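-- pv_equiv track=rewrite | github.com/hvovar39/TheProject | code/utile.py | get_puissance_decomposition
-- ===== SOURCE A (Python) =====
-- from math import sqrt
--
-- def eratostene(X) :
--     tab = [x for x in range (X+1)]
--     tab[1]=0
--
--     for i in range (2, int(sqrt(X+1)+1)):
--         if(tab[i]!=1):
--             for j in range (2*i, X+1, i) :
--                 tab[j] = 1
--
--     return [p for p in range (2, X+1) if tab[p]!=1]
--
-- def get_puissance_decomposition (l, B) :
--     list_p = eratostene(B)
--     res = [[0 for n in range (len(list_p))] for i in range (len(l))]
--
--     for j in range (len(l)):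
--         for x in range(len(list_p)):
--             while(l[j]%list_p[x] == 0):
--                 res[j][x]+=1
--                 l[j]=int(l[j]/list_p[x])
--     return res
-- ===== SOURCE B (Python) =====
-- from math import sqrt
--
-- def eratostene(X):
--     tab = [x for x in range(X + 1)]
--     tab[1] = 0
--     for i in range(2, int(sqrt(X + 1) + 1)):
--         if tab[i] != 1:
--             for j in range(2 * i, X + 1, i):
--                 tab[j] = 1
--     return [p for p in range(2, X + 1) if tab[p] != 1]
--
-- def get_puissance_decomposition(l, B):
--     primes = eratostene(B)
--     idx = {p: i for i, p in enumerate(primes)}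
--     res = []
--     for n in l:
--         m = abs(n)
--         row = [0] * len(primes)
--         for i, p in enumerate(primes):
--             if p * p > m:
--                 break
--             while m % p == 0:
--                 row[i] += 1
--                 m //= p
--         # residual is 1 or a prime; if it is a prime <= B, bump its column
--         if m > 1 and m in idx:
--             row[idx[m]] += 1
--         res.append(row)
--     return res
-- ===== Notes on version B (the rewrite author's own statement) =====
-- stated objective: faster
-- what changed: Instead of trial-dividing every number by every prime up to B, B trial-divides only by primes p with p*p <= remaining value (early break over the sorted prime list) and places the at-most-one remaining prime factor via a precomputed prime->column dict (sieve helper kept); intended as faster per element, measured 3.17x at the largest size both finished (unconfirmed at sizes where the shared sieve dominates and both time out).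
import Mathlib
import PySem

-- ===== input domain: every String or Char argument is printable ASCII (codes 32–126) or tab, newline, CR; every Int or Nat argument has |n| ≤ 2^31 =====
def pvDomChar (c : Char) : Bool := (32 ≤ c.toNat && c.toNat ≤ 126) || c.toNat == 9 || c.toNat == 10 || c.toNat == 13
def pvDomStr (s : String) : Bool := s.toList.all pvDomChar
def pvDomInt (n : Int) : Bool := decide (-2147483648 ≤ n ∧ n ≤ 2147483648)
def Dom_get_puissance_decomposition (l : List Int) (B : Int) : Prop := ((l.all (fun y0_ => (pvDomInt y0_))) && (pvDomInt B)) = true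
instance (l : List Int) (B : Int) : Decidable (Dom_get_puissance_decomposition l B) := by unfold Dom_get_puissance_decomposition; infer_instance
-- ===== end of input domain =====

-- B factors each number by trial division over the sieved primes only up to sqrt of the remaining
-- value (early break) and places the at-most-one residual prime factor via a prime->column dict;
-- equivalence is about the RETURN value only (Python A reassigns l[j] in place, B does not mutate l).

-- ===== PORT A =====
-- int(sqrt(X+1)+1): exact = Nat.sqrt(X+1)+1 for 1 ≤ X ≤ 2^31 (double sqrt is correctly rounded
-- there and cannot round across an integer).
def pySqrtBound (X : Int) : Int := ((X + 1).toNat.sqrt : Int) + 1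

-- tab after the two marking loops of eratostene
def sieveTab (X : Int) : List Int :=
  (PySem.List.pyRange 2 (pySqrtBound X) 1).foldl
    (fun tab i =>
      if tab.getD i.toNat 0 ≠ 1 then
        (PySem.List.pyRange (2 * i) (X + 1) i).foldl (fun tab j => tab.set j.toNat 1) tab
      else tab)
    ((PySem.List.pyRange 0 (X + 1) 1).set 1 0)

def eratostene (X : Int) : List Int :=
  (PySem.List.pyRange 2 (X + 1) 1).filter (fun p => decide ((sieveTab X).getD p.toNat 0 ≠ 1))

-- the while-loop 'while l[j] % p == 0: res += 1; l[j] = int(l[j]/p)'; fuel natAbs v is enough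
-- whenever the Python loop terminates (v ≠ 0); int(v/p) is exact truncating division here.
def pyDivLoopA : Nat → Int → Int → Int × Int
  | 0, v, _ => (0, v)
  | fuel + 1, v, p =>
    if PySem.Int.mod v p = 0 then
      let r := pyDivLoopA fuel (PySem.Int.truncdiv v p) p
      (r.1 + 1, r.2)
    else (0, v)

def get_puissance_decomposition (l : List Int) (B : Int) : List (List Int) :=
  let list_p := eratostene B
  l.map (fun n =>
    (list_p.foldl (fun (acc : List Int × Int) p =>
        let r := pyDivLoopA acc.2.natAbs acc.2 p
        (acc.1 ++ [r.1], r.2)) ([], n)).1)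

-- ===== PORT B =====
-- 'while m % p == 0: row[i] += 1; m //= p' (same fuel discipline as A's while)
def bDivLoop : Nat → Int → Int → Int × Int
  | 0, m, _ => (0, m)
  | fuel + 1, m, p =>
    if PySem.Int.mod m p = 0 then
      let r := bDivLoop fuel (PySem.Int.floordiv m p) p
      (r.1 + 1, r.2)
    else (0, m)

-- 'for i, p in enumerate(primes): if p*p > m: break; …' — on break the untouched tail of
-- row = [0]*len(primes) stays zero
def bLoop : List Int → Int → List Int × Int
  | [], m => ([], m)
  | p :: rest, m =>
    if p * p > m then (List.replicate (p :: rest).length 0, m)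
    else
      let r := bDivLoop m.natAbs m p
      let t := bLoop rest r.2
      (r.1 :: t.1, t.2)

def get_puissance_decomposition_alt (l : List Int) (B : Int) : List (List Int) :=
  let primes := eratostene B
  let idx : PySem.Dict Int Int :=
    (PySem.List.enumerate primes 0).foldl (fun d q => d.insert q.2 q.1) PySem.Dict.empty
  l.map (fun n =>
    let t := bLoop primes |n|
    if 1 < t.2 ∧ idx.contains t.2 = true then
      t.1.modify (idx.getD t.2 0).toNat (· + 1)
    else t.1)

-- ===== PRECONDITION & SPEC =====
-- Pre_ excludes exactly the inputs where the Python A does not return: B ≤ 0 (tab[1]=0 raises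
-- IndexError; B's sieve raises there too) and 0 ∈ l with B ≥ 2 (the while loop on l[j]=0 never ends).
def Pre_get_puissance_decomposition (l : List Int) (B : Int) : Prop :=
  1 ≤ B ∧ (2 ≤ B → ∀ n ∈ l, n ≠ 0)
instance (l : List Int) (B : Int) : Decidable (Pre_get_puissance_decomposition l B) := by
  unfold Pre_get_puissance_decomposition; infer_instance

def pvWitness_get_puissance_decomposition : List Int × Int := ([6, -12, 97, 1], 10)

def Spec_get_puissance_decomposition (l : List Int) (B : Int) (out : List (List Int)) : Prop := out = get_puissance_decomposition_alt l B
instance (l : List Int) (B : Int) (out : List (List Int)) : Decidable (Spec_get_puissance_decomposition l B out) := by unfold Spec_get_puissance_decomposition; infer_instance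

-- ===== CLAIM (what is proved, stated in full; the proofs are below) =====
def Claim_equal_get_puissance_decomposition : Prop := ∀ (l : List Int) (B : Int), Dom_get_puissance_decomposition l B → Pre_get_puissance_decomposition l B → Spec_get_puissance_decomposition l B (get_puissance_decomposition l B)

-- ===== LEMMAS AND PROOFS =====

-- both while-loop ports agree: in the executed branch the division is exact and the divisor positive
lemma bDivLoop_eq_pyDivLoopA (fuel : Nat) : ∀ (v p : Int), 0 < p → bDivLoop fuel v p = pyDivLoopA fuel v p := by
  induction fuel with
  | zero => intro v p _; rfl
  | succ f ih =>
    intro v p hp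
    simp only [bDivLoop, pyDivLoopA]
    by_cases h : PySem.Int.mod v p = 0
    · have hd : p ∣ v := (PySem.Int.mod_eq_zero_iff_dvd v p).mp h
      rw [if_pos h, if_pos h, PySem.Int.floordiv_eq_ediv_of_pos hp,
        show PySem.Int.truncdiv v p = v / p from Int.tdiv_eq_ediv_of_dvd hd, ih _ _ hp]
    · rw [if_neg h, if_neg h]

-- the while loop divides out exactly the full power of the prime p
lemma pyDivLoopA_spec (p : Nat) (hp : p.Prime) :
    ∀ (fuel : Nat) (v : Int), v ≠ 0 → v.natAbs ≤ fuel →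
    ∃ v' : Int, pyDivLoopA fuel v (p : Int) = ((v.natAbs.factorization p : Int), v') ∧
      v'.natAbs = v.natAbs / p ^ v.natAbs.factorization p ∧ v' ≠ 0 ∧ (0 ≤ v → 0 ≤ v') := by
  intro fuel
  induction fuel with
  | zero => intro v hv hle; exact absurd (Int.natAbs_eq_zero.mp (Nat.le_zero.mp hle)) hv
  | succ f ih =>
    intro v hv hle
    have hp0 : (p : Int) ≠ 0 := by exact_mod_cast hp.pos.ne'
    by_cases hdvd : (p : Int) ∣ v
    · have hm : PySem.Int.mod v (p : Int) = 0 := (PySem.Int.mod_eq_zero_iff_dvd v _).mpr hdvd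
      obtain ⟨w, hw⟩ := hdvd
      have hw0 : w ≠ 0 := by rintro rfl; rw [mul_zero] at hw; exact hv hw
      have htd : PySem.Int.truncdiv v (p : Int) = w := by
        rw [hw]; exact Int.mul_tdiv_cancel_left w hp0
      have hna : v.natAbs = p * w.natAbs := by
        rw [hw, Int.natAbs_mul, Int.natAbs_natCast]
      have hwa0 : w.natAbs ≠ 0 := Int.natAbs_ne_zero.mpr hw0
      have hwle : w.natAbs ≤ f := by
        have h2 : 2 ≤ p := hp.two_le
        have : 2 * w.natAbs ≤ p * w.natAbs := Nat.mul_le_mul_right _ h2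
        omega
      obtain ⟨v', hv', hv'abs, hv'0, hv'sgn⟩ := ih w hw0 hwle
      have hfac : v.natAbs.factorization p = w.natAbs.factorization p + 1 := by
        rw [hna, Nat.factorization_mul hp.pos.ne' hwa0]
        simp [hp.factorization_self]
        omega
      have h2 : (2:Int) ≤ (p:Int) := by exact_mod_cast hp.two_le
      refine ⟨v', ?_, ?_, hv'0, ?_⟩
      · have hstep : pyDivLoopA (f + 1) v (p : Int)
            = ((pyDivLoopA f w (p : Int)).1 + 1, (pyDivLoopA f w (p : Int)).2) := by
          simp [pyDivLoopA, hm, htd]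
        rw [hstep, hv', hfac, Prod.ext_iff]
        refine ⟨?_, rfl⟩
        push_cast
        ring
      · rw [hfac, hna, pow_succ, mul_comm (p ^ _) p, Nat.mul_div_mul_left _ _ hp.pos, hv'abs]
      · intro hv0
        apply hv'sgn
        by_contra hneg
        push Not at hneg
        rw [hw] at hv0
        nlinarith
    · have hm : ¬ PySem.Int.mod v (p : Int) = 0 := fun h =>
        hdvd ((PySem.Int.mod_eq_zero_iff_dvd v _).mp h)
      have hnd : ¬ p ∣ v.natAbs := by
        intro h
        exact hdvd (Int.natAbs_dvd_natAbs.mp (by rwa [Int.natAbs_natCast]))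
      refine ⟨v, ?_, ?_, hv, fun h => h⟩
      · simp [pyDivLoopA, hm, Nat.factorization_eq_zero_of_not_dvd hnd]
      · rw [Nat.factorization_eq_zero_of_not_dvd hnd, pow_zero, Nat.div_one]

-- A's inner double loop computes the exponent row of |v| over a duplicate-free list of primes
lemma A_fold (ps : List Int) (hp : ∀ p ∈ ps, 2 ≤ p ∧ p.toNat.Prime) (hnd : ps.Nodup) :
    ∀ (v : Int) (acc0 : List Int), v ≠ 0 →
    (ps.foldl (fun (acc : List Int × Int) p =>
        let r := pyDivLoopA acc.2.natAbs acc.2 p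
        (acc.1 ++ [r.1], r.2)) (acc0, v)).1
      = acc0 ++ ps.map (fun p => ((v.natAbs.factorization p.toNat : Nat) : Int)) := by
  induction ps with
  | nil => intro v acc0 _; simp
  | cons p rest ih =>
    intro v acc0 hv
    obtain ⟨hp2, hpp⟩ := hp p (List.mem_cons_self ..)
    have hcast : (p.toNat : Int) = p := Int.toNat_of_nonneg (by omega)
    obtain ⟨v', hloop, habs, hv'0, -⟩ := pyDivLoopA_spec p.toNat hpp v.natAbs v hv le_rfl
    rw [hcast] at hloop
    have hstep : (List.foldl (fun (acc : List Int × Int) p =>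
        let r := pyDivLoopA acc.2.natAbs acc.2 p
        (acc.1 ++ [r.1], r.2)) (acc0, v) (p :: rest)).1
      = (List.foldl (fun (acc : List Int × Int) p =>
        let r := pyDivLoopA acc.2.natAbs acc.2 p
        (acc.1 ++ [r.1], r.2)) (acc0 ++ [((v.natAbs.factorization p.toNat : Nat) : Int)], v') rest).1 := by
      simp only [List.foldl_cons, hloop]
    rw [hstep, ih (fun q hq => hp q (List.mem_cons_of_mem _ hq)) hnd.of_cons v' _ hv'0]
    have hmaps : rest.map (fun q => ((v'.natAbs.factorization q.toNat : Nat) : Int))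
        = rest.map (fun q => ((v.natAbs.factorization q.toNat : Nat) : Int)) := by
      apply List.map_congr_left
      intro q hq
      have hqp : q ≠ p := by
        intro h; subst h; exact (List.nodup_cons.mp hnd).1 hq
      obtain ⟨hq2, _⟩ := hp q (List.mem_cons_of_mem _ hq)
      have hqtn : q.toNat ≠ p.toNat := by omega
      rw [habs, Nat.factorization_ordCompl, Finsupp.erase_ne hqtn]
    rw [hmaps]
    simp

-- B's early-exit loop: the row is the exponent row except possibly at the residual, which is
-- 1 or a prime dividing m with multiplicity 1 whenever it occurs in ps
lemma bLoop_spec (ps : List Int) (m : Nat) (hm : 1 ≤ m)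
    (hsort : ps.Pairwise (· < ·)) (hp : ∀ p ∈ ps, 2 ≤ p ∧ p.toNat.Prime)
    (hcomp : ∀ q : Nat, q.Prime → q ∣ m → ((q : Int) ∈ ps ∨ ∀ p ∈ ps, p < (q : Int))) :
    ∃ r : Nat, (bLoop ps (m : Int)).2 = (r : Int) ∧ 1 ≤ r ∧ r ∣ m ∧
      ((r : Int) ∈ ps → r.Prime ∧ m.factorization r = 1) ∧
      (bLoop ps (m : Int)).1
        = ps.map (fun p => if p = (r : Int) then 0 else ((m.factorization p.toNat : Nat) : Int)) := by
  induction ps generalizing m with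
  | nil => exact ⟨m, rfl, hm, dvd_rfl, by simp, by simp [bLoop]⟩
  | cons p rest ih =>
    obtain ⟨hp2, hpp⟩ := hp p (List.mem_cons_self ..)
    have hcast : (p.toNat : Int) = p := Int.toNat_of_nonneg (by omega)
    by_cases hbr : p * p > (m : Int)
    · -- break: every prime factor of m is ≥ p, so m is 1 or a prime
      have hm1 : m = 1 ∨ m.Prime := by
        rcases eq_or_lt_of_le hm with h1 | h2
        · exact Or.inl h1.symm
        · right
          by_contra hnp
          have hq := Nat.minFac_prime (by omega : m ≠ 1)
          have hqd := Nat.minFac_dvd m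
          have hsq : m.minFac ^ 2 ≤ m := Nat.minFac_sq_le_self (by omega) hnp
          have hge : (p : Int) ≤ (m.minFac : Int) := by
            rcases hcomp m.minFac hq hqd with hin | hall
            · rcases List.mem_cons.mp hin with h | h
              · omega
              · have := (List.pairwise_cons.mp hsort).1 _ h; omega
            · have := hall p (List.mem_cons_self ..); omega
          have hsq' : (m.minFac : Int) * m.minFac ≤ (m : Int) := by
            have := hsq; push_cast [pow_two] at this ⊢; exact_mod_cast this
          nlinarith
      have hfac0 : ∀ q ∈ (p :: rest), q ≠ (m : Int) →
          ((m.factorization q.toNat : Nat) : Int) = 0 := by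
        intro q hq hqne
        obtain ⟨hq2, _⟩ := hp q hq
        have hqtn : q.toNat ≠ m := by omega
        rcases hm1 with rfl | hpr
        · simp
        · rw [hpr.factorization]
          simp [hqtn.symm]
      refine ⟨m, ?_, hm, dvd_rfl, ?_, ?_⟩
      · simp [bLoop, hbr]
      · intro hmem
        rcases hm1 with rfl | hpr
        · have := (hp _ hmem).1; norm_num at this
        · exact ⟨hpr, hpr.factorization_self⟩
      · simp only [bLoop, if_pos hbr]
        have : ∀ q ∈ (p :: rest),
            (if q = (m : Int) then 0 else ((m.factorization q.toNat : Nat) : Int)) = 0 := by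
          intro q hq
          by_cases h : q = (m : Int)
          · simp [h]
          · simp [h, hfac0 q hq h]
        rw [show ((p :: rest).map (fun q =>
            if q = (m : Int) then 0 else ((m.factorization q.toNat : Nat) : Int)))
          = List.replicate (p :: rest).length 0 from by
            simpa using List.map_eq_replicate_iff.mpr this]
    · push Not at hbr
      have hmne : (m : Int) ≠ 0 := by exact_mod_cast (by omega : m ≠ 0)
      obtain ⟨v', hloop, habs, hv'0, hv'sgn⟩ :=
        pyDivLoopA_spec p.toNat hpp ((m : Int)).natAbs (m : Int) hmne le_rfl
      rw [hcast] at hloop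
      have hbd : bDivLoop ((m : Int)).natAbs (m : Int) p = ((m.factorization p.toNat : Int), v') := by
        rw [bDivLoop_eq_pyDivLoopA _ _ _ (by omega : (0:Int) < p), hloop, Int.natAbs_natCast]
      set m' : Nat := m / p.toNat ^ m.factorization p.toNat with hm'def
      have hv'eq : v' = (m' : Int) := by
        have h0 : 0 ≤ v' := hv'sgn (by positivity)
        have : v'.natAbs = m' := by rw [habs, Int.natAbs_natCast]
        omega
      have hm'pos : 1 ≤ m' := Nat.ordCompl_pos p.toNat (by omega)
      have hm'dvd : m' ∣ m := Nat.ordCompl_dvd m p.toNat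
      have hpndvd : ¬ p.toNat ∣ m' := Nat.not_dvd_ordCompl hpp (by omega)
      have hfacm' : ∀ q : Nat, q ≠ p.toNat → m'.factorization q = m.factorization q := by
        intro q hq
        rw [hm'def, Nat.factorization_ordCompl, Finsupp.erase_ne hq]
      obtain ⟨r, hrres, hr1, hrdvd, hrin, hrow⟩ := ih m' hm'pos
        (List.Pairwise.of_cons hsort)
        (fun q hq => hp q (List.mem_cons_of_mem _ hq))
        (by
          intro q hqp hqd
          rcases hcomp q hqp (hqd.trans hm'dvd) with hin | hall
          · rcases List.mem_cons.mp hin with h | h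
            · exfalso
              apply hpndvd
              have : q = p.toNat := by omega
              rwa [← this]
            · exact Or.inl h
          · exact Or.inr fun p' hp' => hall p' (List.mem_cons_of_mem _ hp'))
      have hrne : p ≠ (r : Int) := by
        intro h
        have hr : r = p.toNat := by omega
        exact hpndvd (hr ▸ hrdvd)
      have hstep : bLoop (p :: rest) (m : Int)
          = ((m.factorization p.toNat : Int) :: (bLoop rest (m' : Int)).1,
             (bLoop rest (m' : Int)).2) := by
        simp only [bLoop, if_neg (by omega : ¬ p * p > (m : Int)), Int.natAbs_natCast] at *
        simp [hbd, hv'eq]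
      refine ⟨r, ?_, hr1, hrdvd.trans hm'dvd, ?_, ?_⟩
      · rw [hstep]; exact hrres
      · intro hmem
        rcases List.mem_cons.mp hmem with h | h
        · exact absurd h.symm hrne
        · obtain ⟨hrp, hrf⟩ := hrin h
          refine ⟨hrp, ?_⟩
          rw [← hfacm' r ?_]
          · exact hrf
          · intro hrp'
            exact hpndvd (hrp' ▸ hrdvd)
      · rw [hstep, hrow]
        simp only [List.map_cons, if_neg hrne]
        congr 1
        apply List.map_congr_left
        intro q hq
        have hqp : q ≠ p := fun h => by
          have := (List.pairwise_cons.mp hsort).1 q hq; omega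
        obtain ⟨hq2, _⟩ := hp q (List.mem_cons_of_mem _ hq)
        by_cases h : q = (r : Int)
        · simp [h]
        · rw [if_neg h, if_neg h, hfacm' q.toNat (by omega)]

-- the prime->column dict: lookup is the position in the (duplicate-free) list
lemma idx_get (ps : List Int) : ps.Nodup → ∀ (s : Int) (d : PySem.Dict Int Int) (x : Int),
    ((PySem.List.enumerate ps s).foldl (fun d q => d.insert q.2 q.1) d).get? x =
      (match ps.idxOf? x with
      | some k => some (s + (k : Int))
      | none => d.get? x) := by
  induction ps with
  | nil => intro _ s d x; simp [PySem.List.enumerate]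
  | cons p rest ih =>
    intro hnd s d x
    rw [PySem.List.enumerate_cons]
    simp only [List.foldl_cons]
    rw [ih (List.Nodup.of_cons hnd) (s + 1) (d.insert p s) x]
    by_cases hx : x = p
    · subst hx
      have h1 : List.idxOf? x rest = none :=
        List.idxOf?_eq_none_iff.mpr (List.nodup_cons.mp hnd).1
      have h2 : List.idxOf? x (x :: rest) = some 0 := by simp [List.idxOf?_cons]
      rw [h1, h2, PySem.Dict.get?_insert_self]
      simp
    · have h2 : List.idxOf? x (p :: rest) = (List.idxOf? x rest).map (· + 1) := by
        simp [List.idxOf?_cons, show ¬ p = x from fun h => hx h.symm]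
      rw [h2, PySem.Dict.get?_insert_of_ne _ _ hx]
      cases h : List.idxOf? x rest with
      | none => simp
      | some k =>
        simp only []
        congr 1
        push_cast
        ring


-- B's whole per-element computation equals the exponent row
lemma B_row (ps : List Int) (m : Nat) (hm : 1 ≤ m)
    (hsort : ps.Pairwise (· < ·)) (hp : ∀ p ∈ ps, 2 ≤ p ∧ p.toNat.Prime)
    (hcomp : ∀ q : Nat, q.Prime → q ∣ m → ((q : Int) ∈ ps ∨ ∀ p ∈ ps, p < (q : Int))) :
    (if 1 < (bLoop ps (m : Int)).2 ∧
        ((PySem.List.enumerate ps 0).foldl (fun (d : PySem.Dict Int Int) q => d.insert q.2 q.1)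
          PySem.Dict.empty).contains (bLoop ps (m : Int)).2 = true then
      (bLoop ps (m : Int)).1.modify
        (((PySem.List.enumerate ps 0).foldl (fun (d : PySem.Dict Int Int) q => d.insert q.2 q.1)
          PySem.Dict.empty).getD (bLoop ps (m : Int)).2 0).toNat (· + 1)
    else (bLoop ps (m : Int)).1)
      = ps.map (fun p => ((m.factorization p.toNat : Nat) : Int)) := by
  obtain ⟨r, hres, hr1, hrdvd, hrin, hrow⟩ := bLoop_spec ps m hm hsort hp hcomp
  have hnd : ps.Nodup := hsort.imp ne_of_lt
  set D : PySem.Dict Int Int :=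
    (PySem.List.enumerate ps 0).foldl (fun (d : PySem.Dict Int Int) q => d.insert q.2 q.1)
      PySem.Dict.empty with hD
  have hget := idx_get ps hnd 0 PySem.Dict.empty (r : Int)
  rw [hres, hrow]
  by_cases hmem : (r : Int) ∈ ps
  · obtain ⟨hrp, hrf⟩ := hrin hmem
    obtain ⟨k, hk⟩ : ∃ k, List.idxOf? ((r : Int)) ps = some k := by
      cases h : List.idxOf? ((r : Int)) ps with
      | none => exact absurd (List.idxOf?_eq_none_iff.mp h) (by simpa using hmem)
      | some k => exact ⟨k, rfl⟩
    rw [hk] at hget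
    have hget' : D.get? ((r : Int)) = some ((k : Int)) := by rw [hD]; simpa using hget
    have hcont : D.contains ((r : Int)) = true := by
      rw [PySem.Dict.contains_eq_isSome_get?, hget']; rfl
    have hgetD : D.getD ((r : Int)) 0 = ((k : Int)) := by simp [PySem.Dict.getD, hget']
    obtain ⟨hklen, hkeq, -⟩ := List.idxOf?_eq_some_iff.mp hk
    have hr2 : 1 < ((r : Int)) := by exact_mod_cast hrp.one_lt
    rw [if_pos ⟨hr2, hcont⟩, hgetD]
    apply List.ext_getElem
    · simp
    intro i hi1 hi2
    have hlen' : i < ps.length := by simpa using hi2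
    rw [List.getElem_modify]
    simp only [Int.toNat_natCast, List.getElem_map]
    by_cases hik : k = i
    · subst hik
      rw [if_pos rfl, if_pos hkeq, hkeq]
      simp [hrf]
    · rw [if_neg hik]
      have hne : ps[i]'hlen' ≠ ((r : Int)) := by
        intro h
        exact hik (hnd.getElem_inj_iff.mp (hkeq.trans h.symm))
      rw [if_neg hne]
  · have hnone : List.idxOf? ((r : Int)) ps = none := List.idxOf?_eq_none_iff.mpr hmem
    rw [hnone] at hget
    have hget' : D.get? ((r : Int)) = none := by rw [hD]; simpa using hget
    have hcont : D.contains ((r : Int)) = false :=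
      (PySem.Dict.get?_eq_none_iff_contains _ _).mp hget'
    rw [if_neg (by rw [hcont]; rintro ⟨-, h⟩; cases h)]
    apply List.map_congr_left
    intro q hq
    rw [if_neg (show ¬ q = ((r : Int)) from fun h => hmem (h ▸ hq))]

-- ---- sieve correctness ----

-- k has been marked composite once every i < s has been processed
def MarkedBy (s : Int) (k : Nat) : Prop := ∃ p : Nat, p.Prime ∧ (p : Int) < s ∧ p ∣ k ∧ 2 * p ≤ k

def SieveInv (X s : Int) (tab : List Int) : Prop :=
  tab.length = (X + 1).toNat ∧ ∀ k : Nat, k < (X + 1).toNat →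
    (MarkedBy s k → tab.getD k 0 = 1) ∧
    (¬ MarkedBy s k → tab.getD k 0 = (if k = 1 then 0 else (k : Int)))

lemma foldl_set_length (R : List Int) : ∀ (t : List Int),
    (R.foldl (fun t j => t.set j.toNat 1) t).length = t.length := by
  induction R with
  | nil => intro t; rfl
  | cons j R ih => intro t; simp only [List.foldl_cons]; rw [ih, List.length_set]

lemma foldl_set_getD (R : List Int) (hR : ∀ j ∈ R, 0 ≤ j) : ∀ (t : List Int) (k : Nat), k < t.length →
    (R.foldl (fun t j => t.set j.toNat 1) t).getD k 0 = if (k : Int) ∈ R then 1 else t.getD k 0 := by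
  induction R with
  | nil => intro t k _; simp
  | cons j R ih =>
    intro t k hk
    have hj0 : (0 : Int) ≤ j := hR j (List.mem_cons_self ..)
    simp only [List.foldl_cons]
    rw [ih (fun a ha => hR a (List.mem_cons_of_mem _ ha)) _ k (by rw [List.length_set]; exact hk)]
    by_cases hmem : (k : Int) ∈ R
    · simp [hmem]
    · rw [if_neg hmem]
      by_cases hkj : j.toNat = k
      · have hkj' : (k : Int) = j := by omega
        rw [if_pos (by simp [hkj']), List.getD_eq_getElem?_getD, List.getElem?_set,
          if_pos hkj, if_pos (hkj ▸ hk)]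
        rfl
      · have hkj' : (k : Int) ≠ j := fun h => hkj (by omega)
        rw [if_neg (by simp [hkj', hmem]), List.getD_eq_getElem?_getD, List.getElem?_set,
          if_neg hkj, ← List.getD_eq_getElem?_getD]

lemma tab0_getD (X : Int) (k : Nat) (hk : k < (X + 1).toNat) :
    ((PySem.List.pyRange 0 (X + 1) 1).set 1 0).getD k 0 = if k = 1 then 0 else (k : Int) := by
  rw [List.getD_eq_getElem?_getD, List.getElem?_set]
  by_cases hk1 : k = 1
  · rw [if_pos (by omega), if_pos (by rw [PySem.List.length_pyRange_one]; omega)]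
    simp [hk1]
  · rw [if_neg (by omega), PySem.List.getElem?_pyRange_one, if_pos (by omega : k < ((X + 1) - 0).toNat)]
    simp [hk1]

lemma sieve_step (X : Int) (hX : 1 ≤ X) (s : Int) (h2 : 2 ≤ s) (hS : s < pySqrtBound X)
    (tab : List Int) (hInv : SieveInv X s tab) :
    SieveInv X (s + 1) (if tab.getD s.toNat 0 ≠ 1 then
        (PySem.List.pyRange (2 * s) (X + 1) s).foldl (fun tab j => tab.set j.toNat 1) tab
      else tab) := by
  obtain ⟨hlen, hchar⟩ := hInv
  have hN2 : 2 ≤ (X + 1).toNat := by omega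
  have hsN : s.toNat < (X + 1).toNat := by
    have h1 : s ≤ (((X + 1).toNat.sqrt : Nat) : Int) := by unfold pySqrtBound at hS; omega
    have h2' := Nat.sqrt_lt_self (by omega : 1 < (X + 1).toNat)
    omega
  obtain ⟨hmark, hunmark⟩ := hchar s.toNat hsN
  by_cases hM : MarkedBy s s.toNat
  · rw [if_neg (by rw [hmark hM]; simp)]
    refine ⟨hlen, ?_⟩
    intro k hk
    have hequiv : MarkedBy (s + 1) k ↔ MarkedBy s k := by
      constructor
      · rintro ⟨p, hpp, hlt, hdvd, hle⟩
        by_cases hps : (p : Int) = s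
        · exfalso
          obtain ⟨q, hq, hqlt, hqdvd, hqle⟩ := hM
          have hptn : p = s.toNat := by omega
          subst hptn
          rcases (Nat.Prime.eq_one_or_self_of_dvd hpp _ hqdvd) with h | h
          · exact hq.one_lt.ne' h
          · have := hq.two_le; omega
        · exact ⟨p, hpp, by omega, hdvd, hle⟩
      · rintro ⟨p, hpp, hlt, hdvd, hle⟩; exact ⟨p, hpp, by omega, hdvd, hle⟩
    refine ⟨fun h => (hchar k hk).1 (hequiv.mp h), fun h => (hchar k hk).2 (fun hm => h (hequiv.mpr hm))⟩
  · have hval : tab.getD s.toNat 0 = ((s.toNat : Nat) : Int) := by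
      rw [hunmark hM, if_neg (by omega : ¬ s.toNat = 1)]
    rw [if_pos (by rw [hval]; omega)]
    have hprime : s.toNat.Prime := by
      by_contra hnp
      apply hM
      have hq := Nat.minFac_prime (show s.toNat ≠ 1 by omega)
      have hqd := Nat.minFac_dvd s.toNat
      have hsq := Nat.minFac_sq_le_self (show 0 < s.toNat by omega) hnp
      have h2q : 2 ≤ s.toNat.minFac := hq.two_le
      rw [pow_two] at hsq
      refine ⟨s.toNat.minFac, hq, ?_, hqd, by nlinarith⟩
      have : s.toNat.minFac < s.toNat := by nlinarith
      omega
    refine ⟨by rw [foldl_set_length]; exact hlen, ?_⟩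
    intro k hk
    have hkt : k < tab.length := by omega
    have hRpos : ∀ j ∈ PySem.List.pyRange (2 * s) (X + 1) s, 0 ≤ j := by
      intro j hj
      have := (PySem.List.mem_pyRange_iff_of_pos (by omega : (0 : Int) < s) j).mp hj
      omega
    have hs2s : s ∣ 2 * s := dvd_mul_left s 2
    have hmem : ((k : Int) ∈ PySem.List.pyRange (2 * s) (X + 1) s) ↔
        (s.toNat ∣ k ∧ 2 * s.toNat ≤ k) := by
      rw [PySem.List.mem_pyRange_iff_of_pos (by omega : (0 : Int) < s)]
      constructor
      · rintro ⟨hle, hlt, hdvd⟩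
        have hsk : s ∣ (k : Int) := (dvd_sub_left hs2s).mp hdvd
        have : ((s.toNat : Nat) : Int) ∣ (k : Int) := by
          rwa [show ((s.toNat : Nat) : Int) = s by omega]
        exact ⟨Int.natCast_dvd_natCast.mp this, by omega⟩
      · rintro ⟨hdvd, hle⟩
        have hsk : s ∣ (k : Int) := by
          rw [show s = ((s.toNat : Nat) : Int) by omega]
          exact Int.natCast_dvd_natCast.mpr hdvd
        exact ⟨by omega, by omega, (dvd_sub_left hs2s).mpr hsk⟩
    have hequiv : MarkedBy (s + 1) k ↔ (MarkedBy s k ∨ (s.toNat ∣ k ∧ 2 * s.toNat ≤ k)) := by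
      constructor
      · rintro ⟨p, hpp, hlt, hdvd, hle⟩
        by_cases hps : (p : Int) = s
        · right
          have : p = s.toNat := by omega
          exact ⟨this ▸ hdvd, this ▸ hle⟩
        · exact Or.inl ⟨p, hpp, by omega, hdvd, hle⟩
      · rintro (⟨p, hpp, hlt, hdvd, hle⟩ | ⟨hdvd, hle⟩)
        · exact ⟨p, hpp, by omega, hdvd, hle⟩
        · exact ⟨s.toNat, hprime, by omega, hdvd, hle⟩
    rw [foldl_set_getD _ hRpos tab k hkt]
    constructor
    · intro hMk
      rcases hequiv.mp hMk with h | h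
      · by_cases hin : (k : Int) ∈ PySem.List.pyRange (2 * s) (X + 1) s
        · rw [if_pos hin]
        · rw [if_neg hin]; exact (hchar k hk).1 h
      · rw [if_pos (hmem.mpr h)]
    · intro hMk
      have h1 : ¬ MarkedBy s k := fun h => hMk (hequiv.mpr (Or.inl h))
      have h2' : ¬ (s.toNat ∣ k ∧ 2 * s.toNat ≤ k) := fun h => hMk (hequiv.mpr (Or.inr h))
      rw [if_neg (fun h => h2' (hmem.mp h)), (hchar k hk).2 h1]

lemma sieve_fold (X : Int) (hX : 1 ≤ X) : ∀ (c : Nat) (s : Int), 2 ≤ s → s + c = pySqrtBound X →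
    ∀ tab, SieveInv X s tab →
    SieveInv X (pySqrtBound X) ((PySem.List.pyRange s (pySqrtBound X) 1).foldl
      (fun tab i => if tab.getD i.toNat 0 ≠ 1 then
          (PySem.List.pyRange (2 * i) (X + 1) i).foldl (fun tab j => tab.set j.toNat 1) tab
        else tab) tab) := by
  intro c
  induction c with
  | zero =>
    intro s h2 hS tab hInv
    rw [PySem.List.pyRange_one_eq_nil (by omega)]
    simpa [show pySqrtBound X = s by omega] using hInv
  | succ c ih =>
    intro s h2 hS tab hInv
    rw [PySem.List.pyRange_one_cons (by omega : s < pySqrtBound X)]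
    simp only [List.foldl_cons]
    exact ih (s + 1) (by omega) (by omega) _ (sieve_step X hX s h2 (by omega) tab hInv)

lemma sieveTab_inv (X : Int) (hX : 1 ≤ X) : SieveInv X (pySqrtBound X) (sieveTab X) := by
  have hbound : 2 ≤ pySqrtBound X := by
    unfold pySqrtBound
    have : 1 ≤ (X + 1).toNat.sqrt := by
      rw [Nat.le_sqrt]
      omega
    omega
  apply sieve_fold X hX (pySqrtBound X - 2).toNat 2 (by omega) (by omega)
  constructor
  · rw [List.length_set, PySem.List.length_pyRange_one]
    omega
  · intro k hk
    have hnM : ¬ MarkedBy 2 k := by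
      rintro ⟨p, hp, hlt, -, -⟩
      have := hp.two_le; omega
    exact ⟨fun h => absurd h hnM, fun _ => tab0_getD X k hk⟩

lemma eratostene_eq (X : Int) (hX : 1 ≤ X) :
    eratostene X = (PySem.List.pyRange 2 (X + 1) 1).filter (fun p => decide (p.toNat.Prime)) := by
  obtain ⟨hlen, hchar⟩ := sieveTab_inv X hX
  unfold eratostene
  apply List.filter_congr
  intro p hp
  obtain ⟨hp2, hpX⟩ := (PySem.List.mem_pyRange_one.mp hp)
  have hpn : p.toNat < (X + 1).toNat := by omega
  obtain ⟨hmk, hunmk⟩ := hchar p.toNat hpn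
  by_cases hpr : p.toNat.Prime
  · have hnM : ¬ MarkedBy (pySqrtBound X) p.toNat := by
      rintro ⟨q, hq, hqlt, hqdvd, hqle⟩
      rcases (Nat.Prime.eq_one_or_self_of_dvd hpr q hqdvd) with h | h
      · exact hq.one_lt.ne' h
      · have := hq.two_le; omega
    rw [hunmk hnM, if_neg (by omega : ¬ p.toNat = 1)]
    simp [hpr]
    omega
  · have hM : MarkedBy (pySqrtBound X) p.toNat := by
      have hq := Nat.minFac_prime (show p.toNat ≠ 1 by omega)
      have hqd := Nat.minFac_dvd p.toNat
      have hsq := Nat.minFac_sq_le_self (show 0 < p.toNat by omega) hpr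
      have h2q : 2 ≤ p.toNat.minFac := hq.two_le
      rw [pow_two] at hsq
      refine ⟨p.toNat.minFac, hq, ?_, hqd, by nlinarith⟩
      have hle : p.toNat.minFac ≤ (X + 1).toNat.sqrt := by
        rw [Nat.le_sqrt]
        have : p.toNat ≤ (X + 1).toNat := by omega
        nlinarith
      unfold pySqrtBound
      omega
    rw [hmk hM]
    simp [hpr]

lemma mem_eratostene (X : Int) (hX : 1 ≤ X) (x : Int) :
    x ∈ eratostene X ↔ 2 ≤ x ∧ x ≤ X ∧ x.toNat.Prime := by
  rw [eratostene_eq X hX, List.mem_filter, PySem.List.mem_pyRange_one]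
  simp only [decide_eq_true_eq]
  constructor
  · rintro ⟨⟨h1, h2⟩, h3⟩; exact ⟨h1, by omega, h3⟩
  · rintro ⟨h1, h2, h3⟩; exact ⟨⟨h1, by omega⟩, h3⟩

lemma eratostene_sorted (X : Int) (hX : 1 ≤ X) : (eratostene X).Pairwise (· < ·) := by
  rw [eratostene_eq X hX]
  exact (PySem.List.pairwise_lt_pyRange_one 2 (X + 1)).filter _

-- ===== VERDICT (by name: the statement is the Claim_ definition above) =====
theorem get_puissance_decomposition_spec : Claim_equal_get_puissance_decomposition := by
  intro l B _hDom hPre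
  obtain ⟨hB1, hB0⟩ := hPre
  unfold Spec_get_puissance_decomposition get_puissance_decomposition get_puissance_decomposition_alt
  apply List.map_congr_left
  intro n hn
  dsimp only []
  have hsorted := eratostene_sorted B hB1
  have hnd : (eratostene B).Nodup := hsorted.imp ne_of_lt
  have hpmem : ∀ p ∈ eratostene B, 2 ≤ p ∧ p.toNat.Prime := by
    intro p hp
    obtain ⟨h2, -, h4⟩ := (mem_eratostene B hB1 p).mp hp
    exact ⟨h2, h4⟩
  by_cases hB2 : 2 ≤ B
  · have hn0 : n ≠ 0 := hB0 hB2 n hn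
    have hm1 : 1 ≤ n.natAbs := by omega
    have hcomp : ∀ q : Nat, q.Prime → q ∣ n.natAbs →
        ((q : Int) ∈ eratostene B ∨ ∀ p ∈ eratostene B, p < (q : Int)) := by
      intro q hq hqd
      by_cases hqB : (q : Int) ≤ B
      · exact Or.inl ((mem_eratostene B hB1 _).mpr
          ⟨by exact_mod_cast hq.two_le, hqB, by simpa using hq⟩)
      · refine Or.inr fun p hp => ?_
        obtain ⟨-, hpB, -⟩ := (mem_eratostene B hB1 p).mp hp
        omega
    have hA := A_fold (eratostene B) hpmem hnd n [] hn0
    have hB' := B_row (eratostene B) n.natAbs hm1 hsorted hpmem hcomp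
    rw [hA, show |n| = ((n.natAbs : Nat) : Int) from Int.abs_eq_natAbs n, hB']
    simp
  · have hE : eratostene B = [] := by
      rw [eratostene_eq B hB1, PySem.List.pyRange_one_eq_nil (by omega : B + 1 ≤ 2)]
      rfl
    rw [hE]
    simp [bLoop, PySem.List.enumerate, PySem.Dict.contains_eq_isSome_get?, PySem.Dict.get?_empty]
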